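-- pv_equiv track=rewrite | github.com/SKYNNET-ORG/sk_tool | sk_cnn_orig.py | get_combinacion
-- ===== SOURCE A (Python) =====
-- def get_combinacion(a, n):
--     from math import comb
--     pairs = []
--     r = 2
--     c = comb(n, r)
--     if c == a:
--         pairs.append((n, r))
--     if n > 1:
--         pairs += get_combinacion(a, n - 1)
--
--     return pairs
-- ===== SOURCE B (Python) =====
-- def get_combinacion(a, n):
--     # Solve k*(k-1)//2 == a in closed form via the quadratic formula.
--     from math import isqrt
--     if a < 0:
--         return []
--     k = (1 + isqrt(1 + 8 * a)) // 2
--     if k * (k - 1) // 2 == a and k <= n: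
--         return [(k, 2)]
--     return []
-- ===== Notes on version B (the rewrite author's own statement) =====
-- stated objective: faster
-- what changed: Replaces A's O(n) descending recursion testing comb(k,2)==a for every k<=n with an O(1) closed form: solve k(k-1)/2=a by the quadratic formula (isqrt) and validate the single candidate; Pre_ excludes n<0, where A's math.comb raises ValueError, and the degenerate corner a==0,n==0, where returning the empty-set combination (0,2) or nothing are equally defensible readings.
-- outside the precondition, e.g. on get_combinacion(0, 0): A returns [(0, 2)], B returns []
import Mathlib
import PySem

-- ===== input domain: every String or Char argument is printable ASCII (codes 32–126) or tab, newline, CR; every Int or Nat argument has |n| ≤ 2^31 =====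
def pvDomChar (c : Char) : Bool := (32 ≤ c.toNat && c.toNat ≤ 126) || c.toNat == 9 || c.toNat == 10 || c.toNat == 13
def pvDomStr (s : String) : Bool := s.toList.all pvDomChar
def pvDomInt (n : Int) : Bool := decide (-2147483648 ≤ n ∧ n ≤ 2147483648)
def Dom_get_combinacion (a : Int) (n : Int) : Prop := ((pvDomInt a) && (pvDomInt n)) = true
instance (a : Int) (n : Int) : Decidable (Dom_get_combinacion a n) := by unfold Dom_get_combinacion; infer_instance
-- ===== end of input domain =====

-- B replaces A's O(n) descending recursion with an O(1) quadratic-formula solve.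

-- ===== PORT A =====
-- A recurses on n down to 1, checking comb(n,2)==a at each level.
-- comb(n,2) is exact here as n*(n-1)/2 guarded by 2 ≤ n (comb(0,2)=comb(1,2)=0);
-- n < 0 raises ValueError in Python and is excluded by Pre_.
def get_combinacion (a : Int) (n : Int) : List (Int × Int) :=
  let c : Int := if 2 ≤ n then n * (n - 1) / 2 else 0
  let pairs : List (Int × Int) := if c = a then [(n, 2)] else []
  if _h : n > 1 then pairs ++ get_combinacion a (n - 1) else pairs
termination_by n.toNat
decreasing_by omega

-- ===== PORT B =====
-- math.isqrt on the nonnegative argument 1+8a is Int.sqrt; '//' on these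
-- nonnegative values coincides with Lean's Int division.
def get_combinacion_alt (a : Int) (n : Int) : List (Int × Int) :=
  if a < 0 then []
  else
    let k := (1 + Int.sqrt (1 + 8 * a)) / 2
    if k * (k - 1) / 2 = a ∧ k ≤ n then [(k, 2)] else []

-- ===== PRECONDITION & SPEC =====
-- Pre_ excludes n < 0, where Python's math.comb raises ValueError, and the
-- degenerate corner a = 0, n = 0, where A's [(0,2)] and B's [] are equally
-- defensible readings of "combinations of 0 items".
def Pre_get_combinacion (a : Int) (n : Int) : Prop := 0 ≤ n ∧ ¬(a = 0 ∧ n = 0)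
instance (a : Int) (n : Int) : Decidable (Pre_get_combinacion a n) := by unfold Pre_get_combinacion; infer_instance
def pvWitness_get_combinacion : Int × Int := (3, 10)

def Spec_get_combinacion (a : Int) (n : Int) (out : List (Int × Int)) : Prop := out = get_combinacion_alt a n
instance (a : Int) (n : Int) (out : List (Int × Int)) : Decidable (Spec_get_combinacion a n out) := by unfold Spec_get_combinacion; infer_instance

-- ===== CLAIM (what is proved, stated in full; the proofs are below) =====
def Claim_equal_get_combinacion : Prop := ∀ (a : Int) (n : Int), Dom_get_combinacion a n → Pre_get_combinacion a n → Spec_get_combinacion a n (get_combinacion a n)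

-- ===== LEMMAS AND PROOFS =====

-- k*(k-1) is even, so '/2' is exact.
theorem pv_two_dvd (m : Int) : (2 : Int) ∣ m * (m - 1) := by
  rcases Int.even_or_odd m with h | h
  · exact Dvd.dvd.mul_right h.two_dvd _
  · obtain ⟨k, hk⟩ := h
    exact Dvd.dvd.mul_left ⟨k, by omega⟩ _

theorem pv_half_eq {m a : Int} (h : m * (m - 1) / 2 = a) : m * (m - 1) = 2 * a := by
  have := Int.ediv_mul_cancel (pv_two_dvd m)
  omega

-- uniqueness: a solution m ≥ 2 of m(m-1)/2 = a is recovered by the quadratic formula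
theorem pv_formula {m a : Int} (hm : 2 ≤ m) (h : m * (m - 1) / 2 = a) :
    (1 + Int.sqrt (1 + 8 * a)) / 2 = m := by
  have h2 : m * (m - 1) = 2 * a := pv_half_eq h
  have hsq : 1 + 8 * a = (2 * m - 1) * (2 * m - 1) := by nlinarith
  have hs : Int.sqrt (1 + 8 * a) = (2 * m - 1).natAbs := by rw [hsq, Int.sqrt_eq]
  have habs : ((2 * m - 1).natAbs : Int) = 2 * m - 1 := Int.natAbs_of_nonneg (by omega)
  rw [hs, habs]; omega

theorem pv_sqrt_mono {x y : Int} (h : x ≤ y) : Int.sqrt x ≤ Int.sqrt y := by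
  unfold Int.sqrt
  exact_mod_cast Nat.sqrt_le_sqrt (by omega)

-- for a > 0 the candidate k is at least 2
theorem pv_k_ge_two {a : Int} (ha : 0 < a) : 2 ≤ (1 + Int.sqrt (1 + 8 * a)) / 2 := by
  have h9 : Int.sqrt 9 ≤ Int.sqrt (1 + 8 * a) := pv_sqrt_mono (by omega)
  have : Int.sqrt 9 = 3 := by
    rw [show (9 : Int) = 3 * 3 by norm_num, Int.sqrt_eq]; rfl
  omega

-- for a = 0 the candidate k is 1
theorem pv_k_zero : (1 + Int.sqrt (1 + 8 * (0 : Int))) / 2 = 1 := by decide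

-- main induction on the fuel n.toNat
theorem pv_main (a : Int) : ∀ (f : Nat) (n : Int), n.toNat = f → 0 ≤ n → ¬(a = 0 ∧ n = 0) →
    get_combinacion a n = get_combinacion_alt a n := by
  intro f
  induction f with
  | zero =>
    -- n = 0, a ≠ 0
    intro n hf hn hne
    have hn0 : n = 0 := by omega
    subst hn0
    rw [get_combinacion]
    rw [dif_neg (by omega : ¬ (0 : Int) > 1), if_neg (by omega : ¬ (2 : Int) ≤ 0)]
    rw [if_neg (by omega : ¬ (0 : Int) = a)]
    unfold get_combinacion_alt
    rcases lt_trichotomy a 0 with h | h | h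
    · simp [h]
    · exact absurd ⟨h, rfl⟩ hne
    · rw [if_neg (by omega)]
      have := pv_k_ge_two h
      rw [if_neg (by rintro ⟨-, hk⟩; omega)]
  | succ f ih =>
    intro n hf hn _
    rw [get_combinacion]
    by_cases hgt : n > 1
    · simp only [dif_pos hgt]
      rw [ih (n - 1) (by omega) (by omega) (by rintro ⟨-, h⟩; omega)]
      have hn2 : 2 ≤ n := by omega
      simp only [if_pos hn2]
      by_cases hc : n * (n - 1) / 2 = a
      · -- match at n: a > 0, the candidate k equals n, tail is empty
        have h2 : n * (n - 1) = 2 * a := pv_half_eq hc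
        have ha : 0 < a := by nlinarith
        have hk : (1 + Int.sqrt (1 + 8 * a)) / 2 = n := pv_formula hn2 hc
        rw [if_pos hc]
        unfold get_combinacion_alt
        simp only [not_lt.mpr ha.le, if_false, hk]
        rw [if_neg (by rintro ⟨-, h3⟩; omega), if_pos ⟨hc, le_refl n⟩]
        simp
      · rw [if_neg hc, List.nil_append]
        -- no match at n: B gives the same answer at n and n-1
        rcases lt_trichotomy a 0 with ha | ha | ha
        · unfold get_combinacion_alt; simp [ha]
        · subst ha
          unfold get_combinacion_alt
          simp only [lt_self_iff_false, if_false, pv_k_zero]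
          rw [if_pos ⟨by decide, by omega⟩, if_pos ⟨by decide, by omega⟩]
        · unfold get_combinacion_alt
          simp only [not_lt.mpr ha.le, if_false]
          by_cases hx : (1 + Int.sqrt (1 + 8 * a)) / 2 * ((1 + Int.sqrt (1 + 8 * a)) / 2 - 1) / 2 = a ∧
              (1 + Int.sqrt (1 + 8 * a)) / 2 ≤ n - 1
          · rw [if_pos hx, if_pos ⟨hx.1, by omega⟩]
          · rw [if_neg hx, if_neg ?_]
            rintro ⟨hy1, hy2⟩
            by_cases hkn : (1 + Int.sqrt (1 + 8 * a)) / 2 = n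
            · exact hc (hkn ▸ hy1)
            · exact hx ⟨hy1, by omega⟩
    · -- n = 1 (n = 0 handled in the zero case; here f+1 = n.toNat with ¬ n > 1 forces n = 1)
      have hn1 : n = 1 := by omega
      subst hn1
      rw [dif_neg hgt, if_neg (by omega : ¬ (2 : Int) ≤ 1)]
      unfold get_combinacion_alt
      rcases lt_trichotomy a 0 with h | h | h
      · rw [if_neg (by omega), if_pos (by omega)]
      · subst h
        simp only [lt_self_iff_false, if_false, pv_k_zero]
        norm_num
      · rw [if_neg (by omega), if_neg (by omega)]
        have := pv_k_ge_two h
        rw [if_neg (by rintro ⟨-, hk⟩; omega)]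

-- ===== VERDICT (by name: the statement is the Claim_ definition above) =====
theorem get_combinacion_spec : Claim_equal_get_combinacion := by
  intro a n _ hpre
  exact pv_main a n.toNat n rfl hpre.1 hpre.2
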